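-- pv_equiv track=rewrite | github.com/SahilTheCodeBlitz/postman-and-flask-for-obd | appfetchingjsondata.py | mappingFaultCodes
-- ===== SOURCE A (Python) =====
-- mapping = {
--     0: '',
--     1: 'P0133',
--     2: 'C0300',
--     3: 'P0079',
--     4: 'P0078',
--     5: 'P007E',
--     6: 'P007F',
--     7: 'P2004',
--     8: 'U1004',
--     9: 'C1004',
--     10: 'B0004',
--     11: 'P3000',
--     12: 'P18F0',
--     13: 'P18D0',
--     14: 'P18E0',
--     15: 'P2036',
--     16: 'P1004'
-- }
--
-- def mappingFaultCodes(outputArr):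
--     value1 = outputArr[0][0]
--     value2 = outputArr[0][1]
--     value3 = outputArr[0][2]
--
--     faultcodes = []
--
--     for key, value in mapping.items():
--         if key == value1 or key == value2 or key == value3:
--             faultcodes.append(value)
--
--     return faultcodes
-- ===== SOURCE B (Python) =====
-- TABLE = ('', 'P0133', 'C0300', 'P0079', 'P0078', 'P007E', 'P007F', 'P2004',
--          'U1004', 'C1004', 'B0004', 'P3000', 'P18F0', 'P18D0', 'P18E0',
--          'P2036', 'P1004')  # TABLE[k] == mapping[k] for the contiguous keys 0..16
--
--
-- def mappingFaultCodes(outputArr):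
--     row = outputArr[0]
--     mask = 0
--     for v in (row[0], row[1], row[2]):
--         if 0 <= v < len(TABLE):
--             mask |= 1 << v
--     faultcodes = []
--     k = 0
--     while mask:
--         if mask & 1:
--             faultcodes.append(TABLE[k])
--         mask >>= 1
--         k += 1
--     return faultcodes
-- ===== Notes on version B (the rewrite author's own statement) =====
-- stated objective: alternative
-- what changed: B replaces the dict and its 17-entry scan with 3 comparisons each by a 17-bit integer bitmask over the contiguous key range 0..16: each in-range input value sets its bit (OR collapses duplicates), then the set bits are peeled off low-to-high and turned into table entries by direct indexing, so no dict and no per-entry equality tests exist at all.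
import Mathlib
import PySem

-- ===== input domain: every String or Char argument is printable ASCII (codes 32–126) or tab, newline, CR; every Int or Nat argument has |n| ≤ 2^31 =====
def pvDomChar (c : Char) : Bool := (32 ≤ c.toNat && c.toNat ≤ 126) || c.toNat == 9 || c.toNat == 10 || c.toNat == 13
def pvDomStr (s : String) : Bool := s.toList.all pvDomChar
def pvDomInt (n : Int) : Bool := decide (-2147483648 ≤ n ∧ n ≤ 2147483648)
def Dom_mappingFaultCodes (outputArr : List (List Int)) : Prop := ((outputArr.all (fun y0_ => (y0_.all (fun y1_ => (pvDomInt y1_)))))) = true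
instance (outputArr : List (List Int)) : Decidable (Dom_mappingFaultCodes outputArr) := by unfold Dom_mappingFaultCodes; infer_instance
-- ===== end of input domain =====

-- B drops the dict entirely: a 17-bit integer bitmask over the contiguous key range 0..16 records the
-- in-range input values (OR collapses duplicates), then the set bits are peeled off low-to-high and
-- turned into fault-code strings by direct table indexing (objective: alternative).

-- the module-level 'mapping' dict (context of program A)
def pvMapping : PySem.Dict Int String := PySem.Dict.ofList
  [(0, ""), (1, "P0133"), (2, "C0300"), (3, "P0079"), (4, "P0078"), (5, "P007E"),
   (6, "P007F"), (7, "P2004"), (8, "U1004"), (9, "C1004"), (10, "B0004"), (11, "P3000"),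
   (12, "P18F0"), (13, "P18D0"), (14, "P18E0"), (15, "P2036"), (16, "P1004")]

-- ===== PORT A =====
-- outputArr[0][i] is total here via pyGetD; Pre_ excludes exactly the inputs where Python raises IndexError
def mappingFaultCodes (outputArr : List (List Int)) : List String :=
  let row := PySem.List.pyGetD outputArr 0 []
  let value1 := PySem.List.pyGetD row 0 0
  let value2 := PySem.List.pyGetD row 1 0
  let value3 := PySem.List.pyGetD row 2 0
  pvMapping.items.foldl
    (fun faultcodes kv =>
      if kv.1 = value1 ∨ kv.1 = value2 ∨ kv.1 = value3 then faultcodes ++ [kv.2] else faultcodes)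
    []

-- ===== PORT B =====
-- B's module-level TABLE tuple (TABLE[k] = mapping[k] for keys 0..16)
def pvTable : List String :=
  ["", "P0133", "C0300", "P0079", "P0078", "P007E", "P007F", "P2004",
   "U1004", "C1004", "B0004", "P3000", "P18F0", "P18D0", "P18E0", "P2036", "P1004"]

-- the 'for v in (row[0], row[1], row[2]): if 0 <= v < len(TABLE): mask |= 1 << v' loop;
-- 'v.toNat' is exact here because the branch guard gives 0 ≤ v
def pvBuildMask (vs : List Int) : Nat :=
  vs.foldl (fun (mask : Nat) (v : Int) => if 0 ≤ v ∧ v < 17 then mask ||| (1 <<< v.toNat) else mask) 0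

-- the 'while mask: … mask >>= 1; k += 1' loop; TABLE[k] as getD (k < 17 always holds since mask < 2^17)
def pvEmit (mask : Nat) (k : Nat) : List String :=
  if mask = 0 then []
  else (if mask % 2 = 1 then [pvTable.getD k ""] else []) ++ pvEmit (mask / 2) (k + 1)
decreasing_by exact Nat.div_lt_self (Nat.pos_of_ne_zero (by assumption)) (by omega)

def mappingFaultCodes_alt (outputArr : List (List Int)) : List String :=
  let row := PySem.List.pyGetD outputArr 0 []
  pvEmit (pvBuildMask [PySem.List.pyGetD row 0 0, PySem.List.pyGetD row 1 0, PySem.List.pyGetD row 2 0]) 0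

-- ===== PRECONDITION & SPEC =====
-- Pre_ excludes exactly the inputs on which Python A raises IndexError (no first row, or fewer than 3 entries in it)
def Pre_mappingFaultCodes (outputArr : List (List Int)) : Prop :=
  outputArr ≠ [] ∧ 3 ≤ (outputArr.headD []).length
instance (outputArr : List (List Int)) : Decidable (Pre_mappingFaultCodes outputArr) := by
  unfold Pre_mappingFaultCodes; infer_instance

def pvWitness_mappingFaultCodes : List (List Int) := [[1, 0, 16]]

def Spec_mappingFaultCodes (outputArr : List (List Int)) (out : List String) : Prop := out = mappingFaultCodes_alt outputArr
instance (outputArr : List (List Int)) (out : List String) : Decidable (Spec_mappingFaultCodes outputArr out) := by unfold Spec_mappingFaultCodes; infer_instance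

-- ===== CLAIM (what is proved, stated in full; the proofs are below) =====
def Claim_equal_mappingFaultCodes : Prop := ∀ (outputArr : List (List Int)), Dom_mappingFaultCodes outputArr → Pre_mappingFaultCodes outputArr → Spec_mappingFaultCodes outputArr (mappingFaultCodes outputArr)

-- ===== LEMMAS AND PROOFS =====

-- A's accumulator loop is filter-then-project over the items
lemma foldl_items (p : Int → Prop) [DecidablePred p] (items : List (Int × String)) (acc : List String) :
    items.foldl (fun faultcodes kv => if p kv.1 then faultcodes ++ [kv.2] else faultcodes) acc
      = acc ++ (items.filter (fun kv => decide (p kv.1))).map (·.2) := by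
  induction items generalizing acc with
  | nil => simp
  | cons kv rest ih =>
    by_cases hc : p kv.1 <;> simp [hc, ih]

-- one step of the mask-building fold, seen through testBit
lemma testBit_step (m : Nat) (v : Int) (i : Nat) (hi : i < 17) :
    ((if 0 ≤ v ∧ v < 17 then m ||| (1 <<< v.toNat) else m).testBit i)
      = (m.testBit i || decide ((i : Int) = v)) := by
  split_ifs with h
  · have h1 : (1 <<< v.toNat).testBit i = decide ((i : Int) = v) := by
      rw [Nat.shiftLeft_eq, one_mul, Nat.testBit_two_pow]
      have : (v.toNat = i) ↔ ((i : Int) = v) := by omega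
      simp [this]
    simp [Nat.testBit_or, h1]
  · have h2 : ¬ ((i : Int) = v) := by omega
    simp [h2]

-- the built mask's bits below 17 are exactly A's disjunctive key test
lemma testBit_buildMask (v1 v2 v3 : Int) (i : Nat) (hi : i < 17) :
    (pvBuildMask [v1, v2, v3]).testBit i
      = decide ((i : Int) = v1 ∨ (i : Int) = v2 ∨ (i : Int) = v3) := by
  simp only [pvBuildMask, List.foldl_cons, List.foldl_nil]
  rw [testBit_step _ v3 i hi, testBit_step _ v2 i hi, testBit_step _ v1 i hi]
  simp [Nat.zero_testBit, Bool.or_assoc]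

-- the built mask fits in 17 bits
lemma buildMask_lt (vs : List Int) : pvBuildMask vs < 2 ^ 17 := by
  unfold pvBuildMask
  have key : ∀ (l : List Int) (m : Nat), m < 2 ^ 17 →
      l.foldl (fun (mask : Nat) (v : Int) => if 0 ≤ v ∧ v < 17 then mask ||| (1 <<< v.toNat) else mask) m < 2 ^ 17 := by
    intro l
    induction l with
    | nil => intro m hm; exact hm
    | cons v rest ih =>
      intro m hm
      apply ih
      show (if 0 ≤ v ∧ v < 17 then m ||| (1 <<< v.toNat) else m) < 2 ^ 17
      split_ifs with h
      · refine Nat.or_lt_two_pow hm ?_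
        rw [Nat.shiftLeft_eq, one_mul]
        exact Nat.pow_lt_pow_right (by omega) (by omega)
      · exact hm
  exact key _ 0 (by norm_num)

-- the bit-peeling loop reads off the set bits below n in increasing order
lemma emit_eq (n : Nat) : ∀ mask < 2 ^ n, ∀ k,
    pvEmit mask k = ((List.range n).filter (fun i => mask.testBit i)).map
      (fun i => pvTable.getD (k + i) "") := by
  induction n with
  | zero =>
    intro mask hm k
    have h0 : mask = 0 := by simpa using hm
    subst h0
    rw [pvEmit]; simp
  | succ n ih =>
    intro mask hm k
    by_cases h0 : mask = 0
    · subst h0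
      rw [pvEmit]; simp
    · rw [pvEmit, if_neg h0]
      have hdiv : mask / 2 < 2 ^ n := by
        have h2 : 2 ^ (n + 1) = 2 * 2 ^ n := by ring
        omega
      rw [ih (mask / 2) hdiv (k + 1), List.range_succ_eq_map, List.filter_cons]
      have hfilt : List.filter (fun i => mask.testBit i) (List.map Nat.succ (List.range n))
          = List.map Nat.succ (List.filter (fun i => (mask / 2).testBit i) (List.range n)) := by
        rw [List.filter_map]
        congr 1
        apply List.filter_congr
        intro i _
        simp [Function.comp, Nat.testBit_add_one]
      rw [hfilt]
      have htail : List.map (fun i => pvTable.getD (k + 1 + i) "")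
            (List.filter (fun i => (mask / 2).testBit i) (List.range n))
          = List.map (fun i => pvTable.getD (k + i) "")
            (List.map Nat.succ (List.filter (fun i => (mask / 2).testBit i) (List.range n))) := by
        rw [List.map_map]
        apply List.map_congr_left
        intro i _
        simp only [Function.comp_apply, Nat.succ_eq_add_one]
        rw [show k + 1 + i = k + (i + 1) by omega]
      by_cases hpar : mask % 2 = 1
      · have hb : mask.testBit 0 = true := Nat.mod_two_eq_one_iff_testBit_zero.mp hpar
        rw [if_pos hpar, if_pos hb, List.map_cons, htail]
        simp
      · have hb : ¬ (mask.testBit 0 = true) := fun hc =>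
          hpar (Nat.mod_two_eq_one_iff_testBit_zero.mpr hc)
        rw [if_neg hpar, if_neg hb, htail]
        simp

-- the dict's item list, key-indexed: items = [(i, TABLE[i]) for i in range(17)]
lemma items_eq : pvMapping.items = (List.range 17).map (fun (i : Nat) => ((i : Int), pvTable.getD i "")) := by
  decide

-- the two loop bodies agree for arbitrary probe values v1 v2 v3
lemma core (v1 v2 v3 : Int) :
    pvMapping.items.foldl
        (fun faultcodes kv =>
          if kv.1 = v1 ∨ kv.1 = v2 ∨ kv.1 = v3 then faultcodes ++ [kv.2] else faultcodes) []
      = pvEmit (pvBuildMask [v1, v2, v3]) 0 := by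
  rw [foldl_items (fun k => k = v1 ∨ k = v2 ∨ k = v3) pvMapping.items [],
      emit_eq 17 _ (buildMask_lt _) 0, items_eq, List.filter_map]
  simp only [List.nil_append, List.map_map]
  have hp : ∀ i ∈ List.range 17,
      ((fun kv : Int × String => decide (kv.1 = v1 ∨ kv.1 = v2 ∨ kv.1 = v3)) ∘
        (fun (i : Nat) => ((i : Int), pvTable.getD i ""))) i
      = (fun i => (pvBuildMask [v1, v2, v3]).testBit i) i := by
    intro i hi
    simp only [Function.comp_apply]
    rw [testBit_buildMask v1 v2 v3 i (List.mem_range.mp hi)]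
  rw [List.filter_congr hp]
  apply List.map_congr_left
  intro i _
  simp [Function.comp]
-- ===== VERDICT (by name: the statement is the Claim_ definition above) =====
theorem mappingFaultCodes_spec : Claim_equal_mappingFaultCodes := by
  intro outputArr _ _
  exact core _ _ _
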